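-- pv_equiv track=rewrite | github.com/muccg/mambo-ms | mamboms/mambomsapp/spectra_graph.py | enlarge_to_minlength
-- ===== SOURCE A (Python) =====
-- def enlarge_to_minlength(start, end, minlength):
--     start = int(start)
--     end = int(end)
--     while end-start < minlength:
--         start -= 1
--         end += 1
--     if end-start == minlength+1: start -= 1
--     return (start, end)
-- ===== SOURCE B (Python) =====
-- def enlarge_to_minlength(start, end, minlength):
--     start = int(start)
--     end = int(end)
--     gap = end - start
--     k = -((gap - minlength) // 2)   # = ceil((minlength - gap) / 2)
--     if k < 0:
--         k = 0
--     start -= k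
--     end += k
--     if end - start == minlength + 1:
--         start -= 1
--     return (start, end)
-- ===== Notes on version B (the rewrite author's own statement) =====
-- stated objective: faster
-- what changed: Replaces the symmetric-widening while loop with a closed-form ceiling-division count k = max(0, ceil((minlength - gap)/2)) applied in one step; the final off-by-one adjustment is kept.
import Mathlib
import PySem

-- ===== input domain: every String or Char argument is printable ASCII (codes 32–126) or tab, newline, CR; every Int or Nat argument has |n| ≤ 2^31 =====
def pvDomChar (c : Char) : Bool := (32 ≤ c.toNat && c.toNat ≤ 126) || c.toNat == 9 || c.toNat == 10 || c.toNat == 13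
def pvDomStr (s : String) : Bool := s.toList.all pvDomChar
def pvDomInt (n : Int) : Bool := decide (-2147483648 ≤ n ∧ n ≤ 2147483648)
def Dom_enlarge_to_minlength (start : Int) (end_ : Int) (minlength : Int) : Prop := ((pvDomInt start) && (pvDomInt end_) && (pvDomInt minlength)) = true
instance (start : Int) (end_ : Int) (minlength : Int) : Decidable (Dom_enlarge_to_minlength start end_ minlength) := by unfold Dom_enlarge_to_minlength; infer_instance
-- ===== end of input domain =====

-- B replaces A's O(minlength) symmetric-widening loop by a closed-form ceiling-division
-- count of the needed expansions (objective: faster, asymptotic).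

-- ===== PORT A =====
-- the `while end-start < minlength: start -= 1; end += 1` loop, step for step
def enlargeLoop (start : Int) (end_ : Int) (minlength : Int) : Int × Int :=
  if end_ - start < minlength then enlargeLoop (start - 1) (end_ + 1) minlength
  else (start, end_)
termination_by (minlength - (end_ - start)).toNat
decreasing_by omega

def enlarge_to_minlength (start : Int) (end_ : Int) (minlength : Int) : Int × Int :=
  let r := enlargeLoop start end_ minlength
  let start := r.1
  let end_ := r.2
  let start := if end_ - start = minlength + 1 then start - 1 else start
  (start, end_)

-- ===== PORT B =====
def enlarge_to_minlength_alt (start : Int) (end_ : Int) (minlength : Int) : Int × Int :=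
  let gap := end_ - start
  let k := -(PySem.Int.floordiv (gap - minlength) 2)   -- = ceil((minlength - gap) / 2)
  let k := if k < 0 then 0 else k
  let start := start - k
  let end_ := end_ + k
  let start := if end_ - start = minlength + 1 then start - 1 else start
  (start, end_)

-- ===== PRECONDITION & SPEC =====
def Spec_enlarge_to_minlength (start : Int) (end_ : Int) (minlength : Int) (out : Int × Int) : Prop := out = enlarge_to_minlength_alt start end_ minlength
instance (start : Int) (end_ : Int) (minlength : Int) (out : Int × Int) : Decidable (Spec_enlarge_to_minlength start end_ minlength out) := by unfold Spec_enlarge_to_minlength; infer_instance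

-- ===== CLAIM (what is proved, stated in full; the proofs are below) =====
def Claim_equal_enlarge_to_minlength : Prop := ∀ (start : Int) (end_ : Int) (minlength : Int), Dom_enlarge_to_minlength start end_ minlength → Spec_enlarge_to_minlength start end_ minlength (enlarge_to_minlength start end_ minlength)

-- ===== LEMMAS AND PROOFS =====

-- the loop shifts start down and end_ up by k = max 0 (ceil((minlength - gap)/2))
theorem enlargeLoop_closed (start end_ minlength : Int) :
    enlargeLoop start end_ minlength =
      (start - (max 0 (-(PySem.Int.floordiv (end_ - start - minlength) 2))),
       end_ + (max 0 (-(PySem.Int.floordiv (end_ - start - minlength) 2)))) := by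
  fun_induction enlargeLoop start end_ minlength with
  | case1 s e h ih =>
    rw [ih]
    have h2 : PySem.Int.floordiv (e + 1 - (s - 1) - minlength) 2
        = PySem.Int.floordiv (e - s - minlength) 2 + 1 := by
      have := PySem.Int.floordiv_eq_ediv_of_pos (a := e + 1 - (s - 1) - minlength) (b := 2) (by omega)
      have := PySem.Int.floordiv_eq_ediv_of_pos (a := e - s - minlength) (b := 2) (by omega)
      omega
    have h3 : PySem.Int.floordiv (e - s - minlength) 2 < 0 := by
      have := PySem.Int.floordiv_eq_ediv_of_pos (a := e - s - minlength) (b := 2) (by omega)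
      omega
    rw [h2]
    rw [Prod.mk.injEq]; constructor <;> omega
  | case2 s e h =>
    have h4 : 0 ≤ PySem.Int.floordiv (e - s - minlength) 2 := by
      have := PySem.Int.floordiv_eq_ediv_of_pos (a := e - s - minlength) (b := 2) (by omega)
      omega
    rw [Prod.mk.injEq]; constructor <;> omega

-- ===== VERDICT (by name: the statement is the Claim_ definition above) =====
theorem enlarge_to_minlength_spec : Claim_equal_enlarge_to_minlength := by
  intro start end_ minlength _
  unfold Spec_enlarge_to_minlength enlarge_to_minlength enlarge_to_minlength_alt
  rw [enlargeLoop_closed]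
  simp only
  have : (if -(PySem.Int.floordiv (end_ - start - minlength) 2) < 0 then (0:Int)
      else -(PySem.Int.floordiv (end_ - start - minlength) 2))
      = max 0 (-(PySem.Int.floordiv (end_ - start - minlength) 2)) := by
    split <;> omega
  rw [this]
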